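-- pv_equiv track=rewrite | github.com/cwb14/LTR_HARVEST_parallel | TSD_motif_adder.py | find_tsd
-- ===== SOURCE A (Python) =====
-- def safe_slice(seq, start0, end0_excl):
--     """Return seq[start0:end0_excl] if within bounds, else ''. """
--     if start0 < 0 or end0_excl > len(seq) or start0 >= end0_excl:
--         return ""
--     return seq[start0:end0_excl]
--
-- def find_tsd(chrom_seq, s_ret, e_ret, vic, tsd_len):
--     """
--     Search ±vic around both element bounds for a perfect TSD of length tsd_len.
--     Positions are 1-based inclusive in the SCN; convert to 0-based here.
--     Returns tsd_string or 'NA'.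
--     """
--     best = None
--     for left_off in range(-vic, vic + 1):
--         left_start0 = (s_ret + left_off - tsd_len) - 1
--         left_end0 = (s_ret + left_off) - 1
--         left = safe_slice(chrom_seq, left_start0, left_end0)
--         if len(left) != tsd_len:
--             continue
--         for right_off in range(-vic, vic + 1):
--             right_start0 = e_ret + right_off  # (e_ret + 1 + ro) - 1
--             right_end0 = right_start0 + tsd_len
--             right = safe_slice(chrom_seq, right_start0, right_end0)
--             if len(right) != tsd_len:
--                 continue
--             if left == right:
--                 score = abs(left_off) + abs(right_off)
--                 cand = (score, left)
--                 if best is None or cand < best: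
--                     best = cand
--     return best[1] if best else "NA"
-- ===== SOURCE B (Python) =====
-- def find_tsd(chrom_seq, s_ret, e_ret, vic, tsd_len):
--     # A TSD must have positive length; clamp both offset windows so every slice
--     # is automatically full-length and in range, hash each right substring to
--     # its minimal |right_off|, then take the lexicographically smallest
--     # (score, tsd) candidate over the left offsets.
--     if tsd_len < 1:
--         return "NA"
--     n = len(chrom_seq)
--     right_min = {}
--     for ro in range(max(-vic, -e_ret), min(vic, n - tsd_len - e_ret) + 1):
--         sub = chrom_seq[e_ret + ro : e_ret + ro + tsd_len]
--         a = abs(ro)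
--         if a < right_min.get(sub, a + 1):
--             right_min[sub] = a
--     cands = [(abs(lo) + right_min[sub], sub)
--              for lo in range(max(-vic, tsd_len + 1 - s_ret), min(vic, n + 1 - s_ret) + 1)
--              for sub in [chrom_seq[s_ret + lo - tsd_len - 1 : s_ret + lo - 1]]
--              if sub in right_min]
--     return min(cands)[1] if cands else "NA"
-- ===== Notes on version B (the rewrite author's own statement) =====
-- stated objective: alternative
-- what changed: Replaces A's nested scan over all (left_off, right_off) pairs and its bounds-checked safe_slice by arithmetically clamped offset windows (every slice full-length by construction), a dictionary built in one pass mapping each right substring to its minimal |right_off|, and a comprehension-built candidate list reduced with min(); B also rejects tsd_len = 0 up front instead of matching empty slices.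
-- intended difference: On tsd_len = 0 with vic >= 0, A returns '' because the zero-length slices on both sides trivially match, while B returns 'NA'; a zero-length TSD is no TSD, so 'NA' is the intended result. — e.g. on find_tsd("AC", 1, 1, 0, 0): A returns "", B returns "NA"
import Mathlib
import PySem

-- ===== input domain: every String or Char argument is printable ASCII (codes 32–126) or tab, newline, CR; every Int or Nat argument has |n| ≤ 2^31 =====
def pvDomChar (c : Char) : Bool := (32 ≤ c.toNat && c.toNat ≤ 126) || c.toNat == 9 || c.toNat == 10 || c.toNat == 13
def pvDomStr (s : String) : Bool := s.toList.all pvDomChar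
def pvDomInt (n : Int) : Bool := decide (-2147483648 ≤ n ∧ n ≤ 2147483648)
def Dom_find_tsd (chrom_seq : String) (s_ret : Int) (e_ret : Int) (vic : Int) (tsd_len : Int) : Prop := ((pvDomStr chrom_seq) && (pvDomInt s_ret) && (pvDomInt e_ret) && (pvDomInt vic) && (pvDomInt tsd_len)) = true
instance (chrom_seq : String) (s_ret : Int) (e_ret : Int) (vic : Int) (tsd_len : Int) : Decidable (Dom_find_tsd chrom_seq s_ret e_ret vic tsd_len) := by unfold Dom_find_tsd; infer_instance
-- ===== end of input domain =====

-- B clamps both offset windows arithmetically, hashes right substrings to their minimal |right_off|,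
-- reduces a comprehension-built candidate list with min(), and rejects tsd_len = 0 up front
-- (intended difference, see D_find_tsd); objective: alternative.


-- ===== PORT A =====
-- helper of A (same module): safe_slice
def safe_slice (seq : List Char) (start0 end0 : Int) : List Char :=
  if start0 < 0 ∨ end0 > (seq.length : Int) ∨ start0 ≥ end0 then []
  else PySem.List.slice seq (some start0) (some end0)

-- Python tuple comparison '(score, string) < (score, string)' (int, str lexicographic)
def pyTupLt (a b : Int × List Char) : Bool := a.1 < b.1 || (a.1 == b.1 && decide (a.2 < b.2))

-- A's 'if best is None or cand < best: best = cand'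
def bestUpd (best : Option (Int × List Char)) (cand : Int × List Char) : Option (Int × List Char) :=
  match best with
  | none => some cand
  | some b => if pyTupLt cand b then some cand else some b

-- body of A's inner loop over right_off
def stepA_inner (cs : List Char) (e_ret t lo : Int) (left : List Char) (best : Option (Int × List Char)) (ro : Int) : Option (Int × List Char) :=
  let right := safe_slice cs (e_ret + ro) (e_ret + ro + t)
  if (right.length : Int) ≠ t then best
  else if left = right then bestUpd best (|lo| + |ro|, left)
  else best

-- body of A's outer loop over left_off
def stepA_outer (cs : List Char) (s_ret e_ret t : Int) (offs : List Int) (best : Option (Int × List Char)) (lo : Int) : Option (Int × List Char) :=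
  let left := safe_slice cs (s_ret + lo - t - 1) (s_ret + lo - 1)
  if (left.length : Int) ≠ t then best
  else offs.foldl (stepA_inner cs e_ret t lo left) best

def find_tsd (chrom_seq : String) (s_ret : Int) (e_ret : Int) (vic : Int) (tsd_len : Int) : String :=
  let cs := chrom_seq.toList
  let offs := PySem.List.pyRange (-vic) (vic + 1) 1
  match offs.foldl (stepA_outer cs s_ret e_ret tsd_len offs) none with
  | some b => String.mk b.2
  | none => "NA"

-- ===== PORT B =====
-- B's dict-building loop body: right substring ↦ minimal |right_off| so far
def rstepB (cs : List Char) (e_ret t : Int) (d : PySem.Dict (List Char) Int) (ro : Int) : PySem.Dict (List Char) Int :=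
  let sub := PySem.List.slice cs (some (e_ret + ro)) (some (e_ret + ro + t))
  if |ro| < d.getD sub (|ro| + 1) then d.insert sub |ro| else d

-- B's comprehension body: the candidate contributed by one left offset, if any
def candB (cs : List Char) (s_ret t : Int) (rightMin : PySem.Dict (List Char) Int) (lo : Int) : Option (Int × List Char) :=
  let sub := PySem.List.slice cs (some (s_ret + lo - t - 1)) (some (s_ret + lo - 1))
  match rightMin.get? sub with
  | some m => some (|lo| + m, sub)
  | none => none

def find_tsd_alt (chrom_seq : String) (s_ret : Int) (e_ret : Int) (vic : Int) (tsd_len : Int) : String :=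
  if tsd_len < 1 then "NA" else
  let cs := chrom_seq.toList
  let n : Int := cs.length
  let rightMin := (PySem.List.pyRange (max (-vic) (-e_ret)) (min vic (n - tsd_len - e_ret) + 1) 1).foldl (rstepB cs e_ret tsd_len) PySem.Dict.empty
  let cands := (PySem.List.pyRange (max (-vic) (tsd_len + 1 - s_ret)) (min vic (n + 1 - s_ret) + 1) 1).filterMap (candB cs s_ret tsd_len rightMin)
  match PySem.List.min2? cands Prod.fst Prod.snd with
  | some b => String.mk b.2
  | none => "NA"

-- ===== PRECONDITION & SPEC =====
-- On tsd_len = 0 with vic ≥ 0, A returns '' because the zero-length slices on both sides trivially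
-- match, while B returns 'NA'; a zero-length TSD is no TSD, so 'NA' is the intended result.
def D_find_tsd (chrom_seq : String) (s_ret : Int) (e_ret : Int) (vic : Int) (tsd_len : Int) : Prop := tsd_len = 0 ∧ 0 ≤ vic
instance (chrom_seq : String) (s_ret : Int) (e_ret : Int) (vic : Int) (tsd_len : Int) : Decidable (D_find_tsd chrom_seq s_ret e_ret vic tsd_len) := by unfold D_find_tsd; infer_instance

def Spec_find_tsd (chrom_seq : String) (s_ret : Int) (e_ret : Int) (vic : Int) (tsd_len : Int) (out : String) : Prop := ¬ D_find_tsd chrom_seq s_ret e_ret vic tsd_len → out = find_tsd_alt chrom_seq s_ret e_ret vic tsd_len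
instance (chrom_seq : String) (s_ret : Int) (e_ret : Int) (vic : Int) (tsd_len : Int) (out : String) : Decidable (Spec_find_tsd chrom_seq s_ret e_ret vic tsd_len out) := by unfold Spec_find_tsd; infer_instance

def pvDiffWitness_find_tsd : String × Int × Int × Int × Int := ("AC", 1, 1, 0, 0)
def pvDiffWitnessOut_find_tsd : String × String := ("", "NA")

-- ===== CLAIM (what is proved, stated in full; the proofs are below) =====
def Claim_unchanged_find_tsd : Prop := ∀ (chrom_seq : String) (s_ret : Int) (e_ret : Int) (vic : Int) (tsd_len : Int), Dom_find_tsd chrom_seq s_ret e_ret vic tsd_len → Spec_find_tsd chrom_seq s_ret e_ret vic tsd_len (find_tsd chrom_seq s_ret e_ret vic tsd_len)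
def Claim_changed_find_tsd : Prop := Dom_find_tsd (pvDiffWitness_find_tsd.1) (pvDiffWitness_find_tsd.2.1) (pvDiffWitness_find_tsd.2.2.1) (pvDiffWitness_find_tsd.2.2.2.1) (pvDiffWitness_find_tsd.2.2.2.2) ∧ D_find_tsd (pvDiffWitness_find_tsd.1) (pvDiffWitness_find_tsd.2.1) (pvDiffWitness_find_tsd.2.2.1) (pvDiffWitness_find_tsd.2.2.2.1) (pvDiffWitness_find_tsd.2.2.2.2) ∧ find_tsd (pvDiffWitness_find_tsd.1) (pvDiffWitness_find_tsd.2.1) (pvDiffWitness_find_tsd.2.2.1) (pvDiffWitness_find_tsd.2.2.2.1) (pvDiffWitness_find_tsd.2.2.2.2) = pvDiffWitnessOut_find_tsd.1 ∧ find_tsd_alt (pvDiffWitness_find_tsd.1) (pvDiffWitness_find_tsd.2.1) (pvDiffWitness_find_tsd.2.2.1) (pvDiffWitness_find_tsd.2.2.2.1) (pvDiffWitness_find_tsd.2.2.2.2) = pvDiffWitnessOut_find_tsd.2 ∧ pvDiffWitnessOut_find_tsd.1 ≠ pvDiffWitnessOut_find_tsd.2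
def Claim_exact_find_tsd : Prop := ∀ (chrom_seq : String) (s_ret : Int) (e_ret : Int) (vic : Int) (tsd_len : Int), Dom_find_tsd chrom_seq s_ret e_ret vic tsd_len → D_find_tsd chrom_seq s_ret e_ret vic tsd_len → find_tsd chrom_seq s_ret e_ret vic tsd_len ≠ find_tsd_alt chrom_seq s_ret e_ret vic tsd_len

-- ===== LEMMAS AND PROOFS =====

-- the multiset of candidates A's inner loop (for a fixed left_off) contributes
def candsOfLo (cs : List Char) (e_ret t lo : Int) (left : List Char) (offs : List Int) : List (Int × List Char) :=
  offs.filterMap (fun ro =>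
    let right := safe_slice cs (e_ret + ro) (e_ret + ro + t)
    if (right.length : Int) ≠ t then none
    else if left = right then some (|lo| + |ro|, left)
    else none)

-- all of A's candidates
def candsA (cs : List Char) (s_ret e_ret t : Int) (offsL offsR : List Int) : List (Int × List Char) :=
  offsL.flatMap (fun lo =>
    let left := safe_slice cs (s_ret + lo - t - 1) (s_ret + lo - 1)
    if (left.length : Int) ≠ t then [] else candsOfLo cs e_ret t lo left offsR)

-- the |right_off| values contributing to key among the offsets offs
def rminContrib (cs : List Char) (e_ret t : Int) (key : List Char) (offs : List Int) : List Int :=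
  offs.filterMap (fun ro =>
    let right := safe_slice cs (e_ret + ro) (e_ret + ro + t)
    if (right.length : Int) ≠ t then none
    else if key = right then some |ro| else none)

def minStep (o : Option Int) (a : Int) : Option Int :=
  match o with
  | none => some a
  | some m => if a < m then some a else some m

def minInt (l : List Int) : Option Int := l.foldl minStep none

-- B's candidates, written over the same unclamped offset lists as A's
def candsB (cs : List Char) (s_ret e_ret t : Int) (offsL offsR : List Int) : List (Int × List Char) :=
  offsL.filterMap (fun lo =>
    let left := safe_slice cs (s_ret + lo - t - 1) (s_ret + lo - 1)
    if (left.length : Int) ≠ t then none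
    else
      match minInt (rminContrib cs e_ret t left offsR) with
      | none => none
      | some m => some (|lo| + m, left))

-- ---- order facts ----
lemma pyTupLt_irrefl (a : Int × List Char) : pyTupLt a a = false := by
  simp [pyTupLt]

lemma pyTupLt_trans {a b c : Int × List Char} (h1 : pyTupLt a b = true) (h2 : pyTupLt b c = true) : pyTupLt a c = true := by
  simp only [pyTupLt, Bool.or_eq_true, Bool.and_eq_true, decide_eq_true_eq, beq_iff_eq] at *
  rcases h1 with h1 | ⟨e1, l1⟩ <;> rcases h2 with h2 | ⟨e2, l2⟩
  · exact Or.inl (lt_trans h1 h2)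
  · exact Or.inl (e2 ▸ h1)
  · exact Or.inl (e1 ▸ h2)
  · exact Or.inr ⟨e1.trans e2, lt_trans l1 l2⟩

lemma pyTupLt_total {a b : Int × List Char} (h : pyTupLt a b = false) : b = a ∨ pyTupLt b a = true := by
  simp only [pyTupLt, Bool.or_eq_false_iff, Bool.and_eq_false_iff, Bool.or_eq_true, Bool.and_eq_true,
    decide_eq_true_eq, decide_eq_false_iff_not, beq_iff_eq, beq_eq_false_iff_ne, ne_eq, not_lt] at *
  obtain ⟨h1, h2⟩ := h
  rcases lt_trichotomy b.1 a.1 with hc | hc | hc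
  · exact Or.inr (Or.inl hc)
  · rcases h2 with h2 | h2
    · exact absurd hc.symm h2
    · rcases lt_trichotomy b.2 a.2 with hs | hs | hs
      · exact Or.inr (Or.inr ⟨hc, hs⟩)
      · exact Or.inl (Prod.ext hc hs)
      · exact absurd hs (not_lt_of_ge h2)
  · exact absurd hc (not_lt_of_ge h1)

-- ---- fold/min machinery ----
lemma foldl_bestUpd_some : ∀ (l : List (Int × List Char)) (b : Int × List Char), ∃ m, l.foldl bestUpd (some b) = some m := by
  intro l
  induction l with
  | nil => exact fun b => ⟨b, rfl⟩
  | cons c l ih =>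
    intro b
    simp only [List.foldl_cons, bestUpd]
    split <;> exact ih _

lemma foldl_bestUpd_min : ∀ (l : List (Int × List Char)) (b m : Int × List Char),
    l.foldl bestUpd (some b) = some m →
    (m = b ∨ m ∈ l) ∧ (∀ c ∈ l, pyTupLt c m = false) ∧ pyTupLt b m = false := by
  intro l
  induction l with
  | nil =>
    intro b m h
    simp only [List.foldl_nil, Option.some.injEq] at h
    subst h
    exact ⟨Or.inl rfl, by simp, pyTupLt_irrefl _⟩
  | cons c l ih =>
    intro b m h
    simp only [List.foldl_cons, bestUpd] at h
    by_cases hcb : pyTupLt c b = true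
    · rw [if_pos hcb] at h
      obtain ⟨hmem, hmin, hcm⟩ := ih c m h
      refine ⟨?_, ?_, ?_⟩
      · rcases hmem with rfl | hm
        · exact Or.inr (List.mem_cons_self)
        · exact Or.inr (List.mem_cons_of_mem _ hm)
      · intro x hx
        rcases List.mem_cons.mp hx with rfl | hx
        · exact hcm
        · exact hmin x hx
      · cases hbm : pyTupLt b m with
        | false => rfl
        | true =>
          exfalso
          have : pyTupLt c m = true := pyTupLt_trans hcb hbm
          rw [hcm] at this; exact Bool.false_ne_true this
    · rw [if_neg hcb] at h
      obtain ⟨hmem, hmin, hbm⟩ := ih b m h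
      refine ⟨?_, ?_, hbm⟩
      · rcases hmem with rfl | hm
        · exact Or.inl rfl
        · exact Or.inr (List.mem_cons_of_mem _ hm)
      · intro x hx
        rcases List.mem_cons.mp hx with rfl | hx
        · cases hxm : pyTupLt x m with
          | false => rfl
          | true =>
            exfalso
            rcases pyTupLt_total (Bool.of_not_eq_true hcb) with rfl | hba
            · rw [hbm] at hxm; exact Bool.false_ne_true hxm
            · have : pyTupLt b m = true := pyTupLt_trans hba hxm
              rw [hbm] at this; exact Bool.false_ne_true this
        · exact hmin x hx

lemma min_of_fold (l : List (Int × List Char)) (hl : l ≠ []) :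
    ∃ m, l.foldl bestUpd none = some m ∧ m ∈ l ∧ ∀ c ∈ l, pyTupLt c m = false := by
  cases l with
  | nil => exact absurd rfl hl
  | cons c l =>
    obtain ⟨m, hm⟩ := foldl_bestUpd_some l c
    obtain ⟨hmem, hmin, hcm⟩ := foldl_bestUpd_min l c m hm
    refine ⟨m, by simpa [bestUpd] using hm, ?_, ?_⟩
    · rcases hmem with rfl | h
      · exact List.mem_cons_self
      · exact List.mem_cons_of_mem _ h
    · intro x hx
      rcases List.mem_cons.mp hx with rfl | hx
      · exact hcm
      · exact hmin x hx

lemma fold_eq_of_dom (A B : List (Int × List Char))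
    (hBA : ∀ b ∈ B, b ∈ A)
    (hAB : ∀ a ∈ A, ∃ b ∈ B, pyTupLt b a = true ∨ b = a) :
    A.foldl bestUpd none = B.foldl bestUpd none := by
  cases hA : A with
  | nil =>
    have hB : B = [] := List.eq_nil_iff_forall_not_mem.mpr (fun b hb => by
      have := hBA b hb; simp [hA] at this)
    simp [hB]
  | cons a0 A' =>
    rw [← hA]
    have hAne : A ≠ [] := by simp [hA]
    obtain ⟨mA, hA1, hA2, hA3⟩ := min_of_fold A hAne
    have hBne : B ≠ [] := by
      obtain ⟨b, hb, _⟩ := hAB a0 (by simp [hA])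
      intro h; rw [h] at hb; exact absurd hb (List.not_mem_nil)
    obtain ⟨mB, hB1, hB2, hB3⟩ := min_of_fold B hBne
    have hmAB : mA ∈ B := by
      obtain ⟨b0, hb0B, hb0⟩ := hAB mA hA2
      rcases hb0 with hlt | rfl
      · rw [hA3 b0 (hBA b0 hb0B)] at hlt; exact absurd hlt Bool.false_ne_true
      · exact hb0B
    have h1 : pyTupLt mB mA = false := hA3 mB (hBA mB hB2)
    have h2 : pyTupLt mA mB = false := hB3 mA hmAB
    have : mA = mB := by
      rcases pyTupLt_total h1 with h | h
      · exact h
      · rw [h2] at h; exact absurd h Bool.false_ne_true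
    rw [hA1, hB1, this]

lemma foldl_minStep_some : ∀ (l : List Int) (b : Int), ∃ m, l.foldl minStep (some b) = some m := by
  intro l
  induction l with
  | nil => exact fun b => ⟨b, rfl⟩
  | cons x l ih =>
    intro b
    simp only [List.foldl_cons, minStep]
    split <;> exact ih _

lemma foldl_minStep_min : ∀ (l : List Int) (b m : Int),
    l.foldl minStep (some b) = some m → (m = b ∨ m ∈ l) ∧ (∀ x ∈ l, m ≤ x) ∧ m ≤ b := by
  intro l
  induction l with
  | nil =>
    intro b m h
    simp only [List.foldl_nil, Option.some.injEq] at h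
    subst h
    exact ⟨Or.inl rfl, by simp, le_refl _⟩
  | cons x l ih =>
    intro b m h
    simp only [List.foldl_cons, minStep] at h
    by_cases hxb : x < b
    · rw [if_pos hxb] at h
      obtain ⟨hmem, hmin, hxm⟩ := ih x m h
      refine ⟨?_, ?_, by omega⟩
      · rcases hmem with rfl | hm
        · exact Or.inr List.mem_cons_self
        · exact Or.inr (List.mem_cons_of_mem _ hm)
      · intro y hy
        rcases List.mem_cons.mp hy with rfl | hy
        · exact hxm
        · exact hmin y hy
    · rw [if_neg hxb] at h
      obtain ⟨hmem, hmin, hbm⟩ := ih b m h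
      refine ⟨?_, ?_, hbm⟩
      · rcases hmem with rfl | hm
        · exact Or.inl rfl
        · exact Or.inr (List.mem_cons_of_mem _ hm)
      · intro y hy
        rcases List.mem_cons.mp hy with rfl | hy
        · omega
        · exact hmin y hy

lemma minInt_spec (l : List Int) (hl : l ≠ []) :
    ∃ m, minInt l = some m ∧ m ∈ l ∧ ∀ x ∈ l, m ≤ x := by
  cases l with
  | nil => exact absurd rfl hl
  | cons x l =>
    obtain ⟨m, hm⟩ := foldl_minStep_some l x
    obtain ⟨hmem, hmin, hxm⟩ := foldl_minStep_min l x m hm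
    refine ⟨m, by simpa [minInt, minStep] using hm, ?_, ?_⟩
    · rcases hmem with rfl | h
      · exact List.mem_cons_self
      · exact List.mem_cons_of_mem _ h
    · intro y hy
      rcases List.mem_cons.mp hy with rfl | hy
      · exact hxm
      · exact hmin y hy

lemma minInt_mem (l : List Int) (m : Int) (h : minInt l = some m) : m ∈ l ∧ ∀ x ∈ l, m ≤ x := by
  cases l with
  | nil => simp [minInt] at h
  | cons x l =>
    obtain ⟨m', h1, h2, h3⟩ := minInt_spec (x :: l) (by simp)
    rw [h1] at h
    cases h
    exact ⟨h2, h3⟩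

-- ---- bridge from port A's loops to candsA ----
lemma innerA_bridge (cs : List Char) (e_ret t lo : Int) (left : List Char) :
    ∀ (offs : List Int) (best : Option (Int × List Char)),
      offs.foldl (stepA_inner cs e_ret t lo left) best = (candsOfLo cs e_ret t lo left offs).foldl bestUpd best := by
  intro offs
  induction offs with
  | nil => intro best; simp [candsOfLo]
  | cons ro offs ih =>
    intro best
    simp only [candsOfLo, List.filterMap_cons] at *
    by_cases h1 : ((safe_slice cs (e_ret + ro) (e_ret + ro + t)).length : Int) ≠ t
    · simp only [List.foldl_cons, stepA_inner, if_pos h1]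
      exact ih best
    · by_cases h2 : left = safe_slice cs (e_ret + ro) (e_ret + ro + t)
      · simp only [List.foldl_cons, stepA_inner, if_neg h1, if_pos h2]
        exact ih _
      · simp only [List.foldl_cons, stepA_inner, if_neg h1, if_neg h2]
        exact ih best

lemma outerA_bridge (cs : List Char) (s_ret e_ret t : Int) (offsR : List Int) :
    ∀ (offsL : List Int) (best : Option (Int × List Char)),
      offsL.foldl (stepA_outer cs s_ret e_ret t offsR) best = (candsA cs s_ret e_ret t offsL offsR).foldl bestUpd best := by
  intro offsL
  induction offsL with
  | nil => intro best; simp [candsA]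
  | cons lo offsL ih =>
    intro best
    simp only [candsA, List.flatMap_cons, List.foldl_cons, List.foldl_append] at *
    by_cases h1 : ((safe_slice cs (s_ret + lo - t - 1) (s_ret + lo - 1)).length : Int) ≠ t
    · simp only [stepA_outer, if_pos h1]
      exact ih best
    · simp only [stepA_outer, if_neg h1]
      rw [innerA_bridge, ih]

-- ---- bridge from B's min() to the bestUpd fold ----
lemma min2?_eq_fold (l : List (Int × List Char)) :
    PySem.List.min2? l Prod.fst Prod.snd = l.foldl bestUpd none := by
  unfold PySem.List.min2?
  congr 1
  funext acc x
  cases acc with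
  | none => rfl
  | some m =>
    simp only [bestUpd, pyTupLt]
    congr 1
    by_cases h1 : x.1 < m.1
    · simp [h1]
    · by_cases h2 : m.1 < x.1
      · simp [h1, h2]; omega
      · have : x.1 = m.1 := by omega
        simp [this]

-- ---- bridge from B's dict fold to minInt over contributions ----
lemma rstepB_get_self (cs : List Char) (e_ret t : Int) (d : PySem.Dict (List Char) Int) (ro : Int) :
    (rstepB cs e_ret t d ro).get? (PySem.List.slice cs (some (e_ret + ro)) (some (e_ret + ro + t)))
      = minStep (d.get? (PySem.List.slice cs (some (e_ret + ro)) (some (e_ret + ro + t)))) |ro| := by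
  simp only [rstepB, PySem.Dict.getD_eq_get?_getD]
  obtain ⟨o, hg⟩ : ∃ o, d.get? (PySem.List.slice cs (some (e_ret + ro)) (some (e_ret + ro + t))) = o := ⟨_, rfl⟩
  simp only [hg]
  cases o with
  | none =>
    rw [if_pos (by simp)]
    simp [minStep, PySem.Dict.get?_insert_self]
  | some m =>
    by_cases h : |ro| < m
    · rw [if_pos (by simpa using h)]
      simp [minStep, h, PySem.Dict.get?_insert_self]
    · rw [if_neg (by simpa using h)]
      simp [minStep, h, hg]

lemma rstepB_get_ne (cs : List Char) (e_ret t : Int) (d : PySem.Dict (List Char) Int) (ro : Int)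
    (key : List Char) (hne : key ≠ PySem.List.slice cs (some (e_ret + ro)) (some (e_ret + ro + t))) :
    (rstepB cs e_ret t d ro).get? key = d.get? key := by
  simp only [rstepB]
  split
  · exact PySem.Dict.get?_insert_of_ne d _ hne
  · rfl

lemma dictB_bridge (cs : List Char) (e_ret t : Int) :
    ∀ (offs : List Int) (d : PySem.Dict (List Char) Int) (key : List Char),
      ((offs.foldl (rstepB cs e_ret t) d).get? key)
        = (offs.filterMap (fun ro => if key = PySem.List.slice cs (some (e_ret + ro)) (some (e_ret + ro + t)) then some |ro| else none)).foldl minStep (d.get? key) := by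
  intro offs
  induction offs with
  | nil => intro d key; simp
  | cons ro offs ih =>
    intro d key
    simp only [List.filterMap_cons, List.foldl_cons]
    by_cases h2 : key = PySem.List.slice cs (some (e_ret + ro)) (some (e_ret + ro + t))
    · subst h2
      rw [if_pos rfl]
      simp only [List.foldl_cons]
      rw [ih, rstepB_get_self]
    · rw [if_neg h2, ih, rstepB_get_ne cs e_ret t d ro key h2]

-- ---- safe_slice vs clamped direct slice (t ≥ 1) ----
lemma safe_slice_out (cs : List Char) (a b t : Int) (ht : 1 ≤ t) (hb : b = a + t)
    (h : ¬ (0 ≤ a ∧ b ≤ (cs.length : Int))) : ((safe_slice cs a b).length : Int) ≠ t := by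
  have he : safe_slice cs a b = [] := by
    unfold safe_slice
    rw [if_pos (by omega)]
  rw [he]
  simp
  omega

lemma safe_slice_in (cs : List Char) (a b t : Int) (ht : 1 ≤ t) (hb : b = a + t)
    (h1 : 0 ≤ a) (h2 : b ≤ (cs.length : Int)) :
    safe_slice cs a b = PySem.List.slice cs (some a) (some b) ∧ ((safe_slice cs a b).length : Int) = t := by
  have hcond : ¬ (a < 0 ∨ b > (cs.length : Int) ∨ a ≥ b) := by omega
  have he : safe_slice cs a b = PySem.List.slice cs (some a) (some b) := by
    unfold safe_slice
    rw [if_neg hcond]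
  refine ⟨he, ?_⟩
  rw [he, PySem.List.slice_toNat cs h1 (by omega)]
  simp only [List.length_take, List.length_drop]
  omega

-- ---- restricting a filterMap over the full offset range to the clamped one ----
lemma filterMap_pyRange_clamp {α : Type} (f : Int → Option α) (a b lo hi : Int)
    (hal : a ≤ lo) (hhb : hi ≤ b)
    (h : ∀ x, a ≤ x → x < b → ¬ (lo ≤ x ∧ x < hi) → f x = none) :
    (PySem.List.pyRange a b 1).filterMap f = (PySem.List.pyRange lo hi 1).filterMap f := by
  by_cases hlh : lo ≤ hi
  · rw [PySem.List.pyRange_one_append a lo b hal (le_trans hlh hhb),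
      PySem.List.pyRange_one_append lo hi b hlh hhb, List.filterMap_append, List.filterMap_append]
    have hpre : (PySem.List.pyRange a lo 1).filterMap f = [] := by
      rw [List.filterMap_eq_nil_iff]
      intro x hx
      rw [PySem.List.mem_pyRange_one] at hx
      exact h x hx.1 (by omega) (by omega)
    have hpost : (PySem.List.pyRange hi b 1).filterMap f = [] := by
      rw [List.filterMap_eq_nil_iff]
      intro x hx
      rw [PySem.List.mem_pyRange_one] at hx
      exact h x (by omega) hx.2 (by omega)
    rw [hpre, hpost]
    simp
  · rw [show PySem.List.pyRange lo hi 1 = [] from PySem.List.pyRange_one_eq_nil (by omega)]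
    simp only [List.filterMap_nil]
    rw [List.filterMap_eq_nil_iff]
    intro x hx
    rw [PySem.List.mem_pyRange_one] at hx
    exact h x hx.1 hx.2 (by omega)

-- ---- candidate-set domination (A's candidates vs B's) ----
lemma candsB_subset (cs : List Char) (s_ret e_ret t : Int) (offsL offsR : List Int) :
    ∀ c ∈ candsB cs s_ret e_ret t offsL offsR, c ∈ candsA cs s_ret e_ret t offsL offsR := by
  intro c hc
  simp only [candsB, List.mem_filterMap] at hc
  obtain ⟨lo, hlo, hc⟩ := hc
  by_cases h1 : ((safe_slice cs (s_ret + lo - t - 1) (s_ret + lo - 1)).length : Int) ≠ t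
  · simp only [if_pos h1] at hc; exact absurd hc (by simp)
  · simp only [if_neg h1] at hc
    cases hm : minInt (rminContrib cs e_ret t (safe_slice cs (s_ret + lo - t - 1) (s_ret + lo - 1)) offsR) with
    | none => rw [hm] at hc; exact absurd hc (by simp)
    | some m =>
      rw [hm] at hc
      obtain ⟨hmem, -⟩ := minInt_mem _ _ hm
      simp only [rminContrib, List.mem_filterMap] at hmem
      obtain ⟨ro, hro, hro2⟩ := hmem
      by_cases h2 : ((safe_slice cs (e_ret + ro) (e_ret + ro + t)).length : Int) ≠ t
      · simp only [if_pos h2] at hro2; exact absurd hro2 (by simp)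
      · simp only [if_neg h2] at hro2
        by_cases h3 : safe_slice cs (s_ret + lo - t - 1) (s_ret + lo - 1) = safe_slice cs (e_ret + ro) (e_ret + ro + t)
        · simp only [if_pos h3, Option.some.injEq] at hro2
          simp only [candsA, List.mem_flatMap]
          refine ⟨lo, hlo, ?_⟩
          simp only [if_neg h1]
          simp only [candsOfLo, List.mem_filterMap]
          refine ⟨ro, hro, ?_⟩
          simp only [if_neg h2, if_pos h3]
          rw [← hc, hro2]
        · simp only [if_neg h3] at hro2; exact absurd hro2 (by simp)

lemma candsA_dominated (cs : List Char) (s_ret e_ret t : Int) (offsL offsR : List Int) :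
    ∀ a ∈ candsA cs s_ret e_ret t offsL offsR,
      ∃ b ∈ candsB cs s_ret e_ret t offsL offsR, pyTupLt b a = true ∨ b = a := by
  intro a ha
  simp only [candsA, List.mem_flatMap] at ha
  obtain ⟨lo, hlo, ha⟩ := ha
  by_cases h1 : ((safe_slice cs (s_ret + lo - t - 1) (s_ret + lo - 1)).length : Int) ≠ t
  · simp only [if_pos h1] at ha; exact absurd ha (by simp)
  · simp only [if_neg h1] at ha
    simp only [candsOfLo, List.mem_filterMap] at ha
    obtain ⟨ro, hro, hro2⟩ := ha
    by_cases h2 : ((safe_slice cs (e_ret + ro) (e_ret + ro + t)).length : Int) ≠ t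
    · simp only [if_pos h2] at hro2; exact absurd hro2 (by simp)
    · by_cases h3 : safe_slice cs (s_ret + lo - t - 1) (s_ret + lo - 1) = safe_slice cs (e_ret + ro) (e_ret + ro + t)
      · simp only [if_neg h2, if_pos h3, Option.some.injEq] at hro2
        have hcontrib : |ro| ∈ rminContrib cs e_ret t (safe_slice cs (s_ret + lo - t - 1) (s_ret + lo - 1)) offsR := by
          simp only [rminContrib, List.mem_filterMap]
          exact ⟨ro, hro, by simp only [if_neg h2, if_pos h3]⟩
        obtain ⟨m, hm, hmm, hmin⟩ := minInt_spec _ (List.ne_nil_of_mem hcontrib)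
        have hmle : m ≤ |ro| := hmin _ hcontrib
        refine ⟨(|lo| + m, safe_slice cs (s_ret + lo - t - 1) (s_ret + lo - 1)), ?_, ?_⟩
        · simp only [candsB, List.mem_filterMap]
          refine ⟨lo, hlo, ?_⟩
          simp only [if_neg h1, hm]
        · rcases lt_or_eq_of_le hmle with hlt | heq
          · left
            rw [← hro2]
            simp only [pyTupLt]
            have : |lo| + m < |lo| + |ro| := by omega
            simp [this]
          · right
            rw [← hro2, heq]
      · simp only [if_neg h2, if_neg h3] at hro2; exact absurd hro2 (by simp)

-- ===== VERDICT (by name: the statements are the Claim_ definitions above) =====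
theorem find_tsd_spec : Claim_unchanged_find_tsd := by
  intro c s e v t _
  unfold Spec_find_tsd D_find_tsd
  intro hnd
  by_cases ht : 1 ≤ t
  · -- main case: tsd_len ≥ 1
    simp only [find_tsd, find_tsd_alt]
    rw [if_neg (show ¬ t < 1 by omega)]
    have key_eq : ∀ (key : List Char),
        rminContrib c.toList e t key (PySem.List.pyRange (-v) (v + 1) 1)
          = (PySem.List.pyRange (max (-v) (-e)) (min v ((c.toList.length : Int) - t - e) + 1) 1).filterMap
              (fun ro => if key = PySem.List.slice c.toList (some (e + ro)) (some (e + ro + t)) then some |ro| else none) := by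
      intro key
      unfold rminContrib
      rw [filterMap_pyRange_clamp _ (-v) (v + 1) (max (-v) (-e)) (min v ((c.toList.length : Int) - t - e) + 1)
        (le_max_left _ _) (by omega) ?_]
      · refine List.filterMap_congr ?_
        intro x hx
        rw [PySem.List.mem_pyRange_one] at hx
        obtain ⟨heq, hlen⟩ := safe_slice_in c.toList (e + x) (e + x + t) t ht rfl (by omega) (by omega)
        rw [heq] at hlen
        simp [heq, hlen]
      · intro x h1 h2 h3
        have hout : ((safe_slice c.toList (e + x) (e + x + t)).length : Int) ≠ t :=
          safe_slice_out c.toList (e + x) (e + x + t) t ht rfl (by omega)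
        simp [hout]
    have hdict : ∀ (key : List Char),
        ((PySem.List.pyRange (max (-v) (-e)) (min v ((c.toList.length : Int) - t - e) + 1) 1).foldl
            (rstepB c.toList e t) PySem.Dict.empty).get? key
          = minInt (rminContrib c.toList e t key (PySem.List.pyRange (-v) (v + 1) 1)) := by
      intro key
      rw [dictB_bridge, PySem.Dict.get?_empty, ← key_eq key]
      rfl
    have cands_eq :
        (PySem.List.pyRange (max (-v) (t + 1 - s)) (min v ((c.toList.length : Int) + 1 - s) + 1) 1).filterMap
            (candB c.toList s t
              ((PySem.List.pyRange (max (-v) (-e)) (min v ((c.toList.length : Int) - t - e) + 1) 1).foldl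
                (rstepB c.toList e t) PySem.Dict.empty))
          = candsB c.toList s e t (PySem.List.pyRange (-v) (v + 1) 1) (PySem.List.pyRange (-v) (v + 1) 1) := by
      symm
      unfold candsB
      rw [filterMap_pyRange_clamp _ (-v) (v + 1) (max (-v) (t + 1 - s)) (min v ((c.toList.length : Int) + 1 - s) + 1)
        (le_max_left _ _) (by omega) ?_]
      · refine List.filterMap_congr ?_
        intro lo hlo
        rw [PySem.List.mem_pyRange_one] at hlo
        obtain ⟨heq, hlen⟩ := safe_slice_in c.toList (s + lo - t - 1) (s + lo - 1) t ht (by ring) (by omega) (by omega)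
        rw [heq] at hlen
        simp only [heq, hlen, candB]
        rw [if_neg (by simp)]
        rw [hdict (PySem.List.slice c.toList (some (s + lo - t - 1)) (some (s + lo - 1)))]
        cases minInt (rminContrib c.toList e t (PySem.List.slice c.toList (some (s + lo - t - 1)) (some (s + lo - 1)))
            (PySem.List.pyRange (-v) (v + 1) 1)) with
        | none => rfl
        | some m => rfl
      · intro x h1 h2 h3
        have hout : ((safe_slice c.toList (s + x - t - 1) (s + x - 1)).length : Int) ≠ t :=
          safe_slice_out c.toList (s + x - t - 1) (s + x - 1) t ht (by ring) (by omega)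
        simp [hout]
    rw [outerA_bridge, min2?_eq_fold, cands_eq,
      fold_eq_of_dom _ _ (candsB_subset c.toList s e t _ _) (candsA_dominated c.toList s e t _ _)]
  · -- degenerate case: tsd_len ≤ 0 (and not the changed region)
    simp only [find_tsd, find_tsd_alt]
    rw [if_pos (show t < 1 by omega), outerA_bridge]
    have hA : candsA c.toList s e t (PySem.List.pyRange (-v) (v + 1) 1) (PySem.List.pyRange (-v) (v + 1) 1) = [] := by
      by_cases ht0 : t = 0
      · have hv : v < 0 := by
          by_contra hge
          exact hnd ⟨ht0, by omega⟩
        rw [show PySem.List.pyRange (-v) (v + 1) 1 = [] from PySem.List.pyRange_one_eq_nil (by omega)]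
        rfl
      · unfold candsA
        rw [List.flatMap_eq_nil_iff]
        intro lo _
        have hne : ((safe_slice c.toList (s + lo - t - 1) (s + lo - 1)).length : Int) ≠ t := by
          have h0 : (0 : Int) ≤ ((safe_slice c.toList (s + lo - t - 1) (s + lo - 1)).length : Int) :=
            Int.ofNat_nonneg _
          omega
        simp [hne]
    rw [hA]
    rfl

theorem find_tsd_changed : Claim_changed_find_tsd := by
  unfold Claim_changed_find_tsd
  decide

theorem find_tsd_tight : Claim_exact_find_tsd := by
  intro c s e v t _ hd
  have hd' : t = 0 ∧ 0 ≤ v := hd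
  obtain ⟨ht0, hv⟩ := hd'
  subst ht0
  have hB : find_tsd_alt c s e v 0 = "NA" := by simp [find_tsd_alt]
  rw [hB]
  simp only [find_tsd]
  rw [outerA_bridge]
  have hleft : ∀ lo : Int, safe_slice c.toList (s + lo - 0 - 1) (s + lo - 1) = [] := by
    intro lo
    unfold safe_slice
    rw [if_pos (Or.inr (Or.inr (by omega)))]
  have hright : ∀ ro : Int, safe_slice c.toList (e + ro) (e + ro + 0) = [] := by
    intro ro
    unfold safe_slice
    rw [if_pos (Or.inr (Or.inr (by omega)))]
  have hmem0 : ((0 : Int), ([] : List Char)) ∈ candsA c.toList s e 0 (PySem.List.pyRange (-v) (v + 1) 1) (PySem.List.pyRange (-v) (v + 1) 1) := by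
    simp only [candsA, List.mem_flatMap]
    refine ⟨0, ?_, ?_⟩
    · rw [PySem.List.mem_pyRange_one]
      omega
    · simp only [hleft 0, List.length_nil]
      rw [if_neg (by simp)]
      simp only [candsOfLo, List.mem_filterMap]
      refine ⟨0, ?_, ?_⟩
      · rw [PySem.List.mem_pyRange_one]
        omega
      · rw [hright 0]
        norm_num
  have hsnd : ∀ x ∈ candsA c.toList s e 0 (PySem.List.pyRange (-v) (v + 1) 1) (PySem.List.pyRange (-v) (v + 1) 1), x.2 = ([] : List Char) := by
    intro x hx
    simp only [candsA, List.mem_flatMap] at hx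
    obtain ⟨lo, -, hx⟩ := hx
    simp only [hleft lo, List.length_nil] at hx
    rw [if_neg (by simp)] at hx
    simp only [candsOfLo, List.mem_filterMap] at hx
    obtain ⟨ro, -, hx⟩ := hx
    rw [hright ro] at hx
    norm_num at hx
    rw [← hx]
  obtain ⟨m, hm1, hm2, -⟩ := min_of_fold _ (List.ne_nil_of_mem hmem0)
  rw [hm1]
  obtain ⟨m1, m2⟩ := m
  have hm2' : m2 = [] := hsnd (m1, m2) hm2
  subst hm2'
  show String.mk [] ≠ "NA"
  decide
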